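-- pv_equiv track=rewrite | github.com/docxology/MetaInformAnt | src/metainformant/visualization/palettes.py | alternating_pair
-- ===== SOURCE A (Python) =====
-- from typing import Dict, List, Sequence
--
-- def alternating_pair(n: int = 2) -> List[str]:
--     """Return alternating color pairs for Manhattan-style plots.
--
--     Args:
--         n: Number of alternating color pairs.
--     """
--     base_pairs = [
--         ("#4393C3", "#2166AC"),
--         ("#F4A582", "#D6604D"),
--         ("#A6D854", "#4DAF4A"),
--         ("#FFD92F", "#E6AB02"),
--     ]
--     result = []
--     for i in range(n):
--         pair = base_pairs[i % len(base_pairs)]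
--         result.extend(pair)
--     return result
-- ===== SOURCE B (Python) =====
-- from typing import Dict, List, Sequence
--
-- def alternating_pair(n: int = 2) -> List[str]:
--     """Return alternating color pairs: repeat the whole 8-color palette
--     ceil(n/4) times in one step, then truncate to the first 2*n colors.
--     No per-element loop: list repetition + one slice."""
--     palette = [
--         "#4393C3", "#2166AC",
--         "#F4A582", "#D6604D",
--         "#A6D854", "#4DAF4A",
--         "#FFD92F", "#E6AB02",
--     ]
--     return (palette * -(-n // 4))[: 2 * n]
-- ===== Notes on version B (the rewrite author's own statement) =====
-- stated objective: alternative
-- what changed: Replaces the per-iteration loop that extends an accumulator pair by pair with whole-palette bulk construction: repeat the flat 8-color palette ceil(n/4) times by list multiplication, then truncate with one slice to 2*n elements.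
import Mathlib
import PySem

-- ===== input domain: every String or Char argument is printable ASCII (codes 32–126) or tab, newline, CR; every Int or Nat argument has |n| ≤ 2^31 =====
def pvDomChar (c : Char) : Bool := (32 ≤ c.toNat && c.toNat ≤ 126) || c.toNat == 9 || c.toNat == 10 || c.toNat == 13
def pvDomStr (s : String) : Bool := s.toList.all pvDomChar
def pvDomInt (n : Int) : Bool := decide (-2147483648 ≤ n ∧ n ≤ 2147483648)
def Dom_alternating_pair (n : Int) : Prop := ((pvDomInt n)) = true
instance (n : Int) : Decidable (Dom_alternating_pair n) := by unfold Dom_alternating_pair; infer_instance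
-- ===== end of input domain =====

-- B builds the whole answer in bulk: repeat the flat 8-color palette ceil(n/4) times
-- (list multiplication) and truncate with one slice to 2*n colors, instead of A's
-- per-iteration loop extending an accumulator pair by pair (alternative; same cost).

-- ===== PORT A =====
def apBase : List (String × String) :=
  [("#4393C3", "#2166AC"), ("#F4A582", "#D6604D"), ("#A6D854", "#4DAF4A"), ("#FFD92F", "#E6AB02")]

def alternating_pair (n : Int) : List String :=
  (PySem.List.pyRange 0 n 1).foldl
    (fun result i =>
      let pair := PySem.List.pyGetD apBase (PySem.Int.mod i (apBase.length : Int)) ("", "")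
      result ++ [pair.1, pair.2]) []

-- ===== PORT B =====
def apFlat : List String :=
  ["#4393C3", "#2166AC", "#F4A582", "#D6604D", "#A6D854", "#4DAF4A", "#FFD92F", "#E6AB02"]

def alternating_pair_alt (n : Int) : List String :=
  PySem.List.slice (PySem.List.pyRepeat apFlat (-(PySem.Int.floordiv (-n) 4))) none (some (2 * n))

-- ===== PRECONDITION & SPEC =====
def Spec_alternating_pair (n : Int) (out : List String) : Prop := out = alternating_pair_alt n
instance (n : Int) (out : List String) : Decidable (Spec_alternating_pair n out) := by unfold Spec_alternating_pair; infer_instance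

-- ===== CLAIM (what is proved, stated in full; the proofs are below) =====
def Claim_equal_alternating_pair : Prop := ∀ (n : Int), Dom_alternating_pair n → Spec_alternating_pair n (alternating_pair n)

-- ===== LEMMAS AND PROOFS =====

-- proof-side closed form: first t colors of the infinite cyclic palette
def apCyc (t : Nat) : List String := (List.range t).map (fun j => apFlat.getD (j % 8) "")

-- The two colors A appends at step m are apCyc's entries at positions 2m, 2m+1.
lemma ap_step (m : Nat) :
    [(PySem.List.pyGetD apBase (PySem.Int.mod (m : Int) ((apBase.length : Nat) : Int)) ("", "")).1,
     (PySem.List.pyGetD apBase (PySem.Int.mod (m : Int) ((apBase.length : Nat) : Int)) ("", "")).2]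
    = [apFlat.getD ((2 * m) % 8) "", apFlat.getD ((2 * m + 1) % 8) ""] := by
  have h4 : (apBase.length : Nat) = 4 := by decide
  rw [h4, PySem.Int.mod_natCast m 4]
  have hm : m % 4 = 0 ∨ m % 4 = 1 ∨ m % 4 = 2 ∨ m % 4 = 3 := by omega
  rcases hm with h | h | h | h <;>
    · have h2 : (2 * m) % 8 = 2 * (m % 4) := by omega
      have h3 : (2 * m + 1) % 8 = 2 * (m % 4) + 1 := by omega
      rw [h2, h3, h]
      decide

lemma ap_closed (m : Nat) : alternating_pair (m : Int) = apCyc (2 * m) := by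
  induction m with
  | zero => decide
  | succ k ih =>
    unfold alternating_pair at *
    rw [show ((k + 1 : Nat) : Int) = (k : Int) + 1 by push_cast; ring,
        PySem.List.pyRange_one_succ_right (by positivity),
        List.foldl_append, ih]
    simp only [List.foldl_cons, List.foldl_nil]
    have hstep := ap_step k
    push_cast at hstep
    rw [show 2 * (k + 1) = (2 * k + 1) + 1 by ring]
    unfold apCyc
    rw [List.range_succ, List.range_succ, List.map_append, List.map_append]
    simp only [List.map_cons, List.map_nil, List.append_assoc]
    rw [hstep]
    simp

-- k whole copies of the palette are the first 8k colors of the cycle.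
lemma ap_repeat (k : Nat) : (List.replicate k apFlat).flatten = apCyc (8 * k) := by
  induction k with
  | zero => decide
  | succ j ih =>
    rw [List.replicate_succ', List.flatten_append, ih]
    unfold apCyc
    rw [show 8 * (j + 1) = 8 * j + 8 by ring, List.range_add, List.map_append]
    congr 1
    simp only [List.map_map]
    simp [List.range_succ]
    decide

lemma ap_take (t T : Nat) (h : t ≤ T) : (apCyc T).take t = apCyc t := by
  unfold apCyc
  rw [← List.map_take, List.take_range, Nat.min_eq_left h]

-- ===== VERDICT (by name: the statement is the Claim_ definition above) =====
theorem alternating_pair_spec : Claim_equal_alternating_pair := by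
  intro n _
  unfold Spec_alternating_pair alternating_pair_alt
  set q := PySem.Int.floordiv (-n) 4 with hq
  have h1 : q * 4 ≤ -n := by
    have := (PySem.Int.le_floordiv_iff_mul_le (a := -n) (b := 4) (q := q) (by omega)).mpr
    exact (PySem.Int.le_floordiv_iff_mul_le (a := -n) (b := 4) (q := q) (by omega)).mp le_rfl
  have h2 : -n < (q + 1) * 4 := by
    exact (PySem.Int.floordiv_lt_iff_lt_mul (a := -n) (b := 4) (q := q + 1) (by omega)).mp (by omega)
  by_cases hn : n ≤ 0
  · have hA : alternating_pair n = [] := by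
      unfold alternating_pair
      rw [PySem.List.pyRange_one_eq_nil hn]
      rfl
    have hk : (-q).toNat = 0 := by omega
    rw [hA]
    unfold PySem.List.pyRepeat
    rw [hk]
    simp [PySem.List.slice]
  · obtain ⟨m, rfl⟩ : ∃ m : Nat, n = (m : Int) := ⟨n.toNat, by omega⟩
    have hk : (-q).toNat = (m + 3) / 4 := by omega
    unfold PySem.List.pyRepeat
    rw [hk, PySem.List.slice_to ((List.replicate ((m + 3) / 4) apFlat).flatten) (b := 2 * (m : Int)) (by omega), ap_repeat,
        show (2 * (m : Int)).toNat = 2 * m by omega,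
        ap_take (2 * m) (8 * ((m + 3) / 4)) (by omega), ap_closed]
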